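-- pv_equiv track=rewrite | github.com/pypi-data/pypi-mirror-395 | packages/ckb-textify/ckb_textify-4.1.1.tar.gz/ckb_textify-4.1.1/ckb_textify/latin.py | _fallback_transliterate
-- ===== SOURCE A (Python) =====
-- MULTI_CHAR_MAP = {
--     "tion": "شن", "ght": "ت", "ph": "ف", "sh": "ش", "ch": "چ",
--     "kh": "خ", "gh": "غ", "th": "س", "zh": "ژ", "oo": "وو",
--     "ee": "ی", "qu": "کو", "ck": "ک",
-- }
--
-- SINGLE_CHAR_MAP = {
--     "a": "ا", "b": "ب", "c": "ک", "d": "د", "e": "ێ", "f": "ف",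
--     "g": "گ", "h": "ه", "i": "ی", "j": "ج", "k": "ک", "l": "ل",
--     "m": "م", "n": "ن", "o": "ۆ", "p": "پ", "q": "ک", "r": "ڕ",
--     "s": "س", "t": "ت", "u": "و", "v": "ڤ", "w": "و", "x": "کس",
--     "y": "ی", "z": "ز",
-- }
--
-- def _fallback_transliterate(word: str) -> str:
--     word = word.lower()
--     result = ""
--     if word and word[0] in "aeiou": result += "ئ"
--
--     i = 0
--     n = len(word)
--     while i < n:
--         found = False
--         for length in [4, 3, 2]:
--             if i + length <= n and word[i:i + length] in MULTI_CHAR_MAP: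
--                 result += MULTI_CHAR_MAP[word[i:i + length]]
--                 i += length
--                 found = True
--                 break
--         if found: continue
--
--         char = word[i]
--         if char in SINGLE_CHAR_MAP:
--             result += SINGLE_CHAR_MAP[char]
--         else:
--             result += char
--         i += 1
--     return result
-- ===== SOURCE B (Python) =====
-- # Hand-compiled transliteration automaton: dispatch on the current character
-- # with the multi-character rules unrolled as explicit lookahead branches
-- # (no rule tables, no slice-and-probe lookups).
-- def _fallback_transliterate(word: str) -> str:
--     w = word.lower()
--     n = len(w)
--     out = []
--     if w and w[0] in "aeiou":
--         out.append("\u0626")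
--     i = 0
--     while i < n:
--         c = w[i]
--         if c == 'a': out.append("ا"); i += 1
--         elif c == 'b': out.append("ب"); i += 1
--         elif c == 'c':
--             if i + 1 < n and w[i+1] == 'h': out.append("چ"); i += 2
--             elif i + 1 < n and w[i+1] == 'k': out.append("ک"); i += 2
--             else: out.append("ک"); i += 1
--         elif c == 'd': out.append("د"); i += 1
--         elif c == 'e':
--             if i + 1 < n and w[i+1] == 'e': out.append("ی"); i += 2
--             else: out.append("ێ"); i += 1
--         elif c == 'f': out.append("ف"); i += 1
--         elif c == 'g':
--             if w.startswith("ht", i + 1): out.append("ت"); i += 3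
--             elif i + 1 < n and w[i+1] == 'h': out.append("غ"); i += 2
--             else: out.append("گ"); i += 1
--         elif c == 'h': out.append("ه"); i += 1
--         elif c == 'i': out.append("ی"); i += 1
--         elif c == 'j': out.append("ج"); i += 1
--         elif c == 'k':
--             if i + 1 < n and w[i+1] == 'h': out.append("خ"); i += 2
--             else: out.append("ک"); i += 1
--         elif c == 'l': out.append("ل"); i += 1
--         elif c == 'm': out.append("م"); i += 1
--         elif c == 'n': out.append("ن"); i += 1
--         elif c == 'o':
--             if i + 1 < n and w[i+1] == 'o': out.append("وو"); i += 2
--             else: out.append("ۆ"); i += 1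
--         elif c == 'p':
--             if i + 1 < n and w[i+1] == 'h': out.append("ف"); i += 2
--             else: out.append("پ"); i += 1
--         elif c == 'q':
--             if i + 1 < n and w[i+1] == 'u': out.append("کو"); i += 2
--             else: out.append("ک"); i += 1
--         elif c == 'r': out.append("ڕ"); i += 1
--         elif c == 's':
--             if i + 1 < n and w[i+1] == 'h': out.append("ش"); i += 2
--             else: out.append("س"); i += 1
--         elif c == 't':
--             if w.startswith("ion", i + 1): out.append("شن"); i += 4
--             elif i + 1 < n and w[i+1] == 'h': out.append("س"); i += 2
--             else: out.append("ت"); i += 1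
--         elif c == 'u': out.append("و"); i += 1
--         elif c == 'v': out.append("ڤ"); i += 1
--         elif c == 'w': out.append("و"); i += 1
--         elif c == 'x': out.append("کس"); i += 1
--         elif c == 'y': out.append("ی"); i += 1
--         elif c == 'z':
--             if i + 1 < n and w[i+1] == 'h': out.append("ژ"); i += 2
--             else: out.append("ز"); i += 1
--         else:
--             out.append(c); i += 1
--     return "".join(out)
-- ===== Notes on version B (the rewrite author's own statement) =====
-- stated objective: alternative
-- what changed: Replaces the table-driven length-4/3/2 slice probes into two dicts by a hand-compiled automaton: a single dispatch on the current character with the multi-character rules unrolled as explicit lookahead branches, so no rule tables, no string slicing and no dict lookups remain.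
import Mathlib
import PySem

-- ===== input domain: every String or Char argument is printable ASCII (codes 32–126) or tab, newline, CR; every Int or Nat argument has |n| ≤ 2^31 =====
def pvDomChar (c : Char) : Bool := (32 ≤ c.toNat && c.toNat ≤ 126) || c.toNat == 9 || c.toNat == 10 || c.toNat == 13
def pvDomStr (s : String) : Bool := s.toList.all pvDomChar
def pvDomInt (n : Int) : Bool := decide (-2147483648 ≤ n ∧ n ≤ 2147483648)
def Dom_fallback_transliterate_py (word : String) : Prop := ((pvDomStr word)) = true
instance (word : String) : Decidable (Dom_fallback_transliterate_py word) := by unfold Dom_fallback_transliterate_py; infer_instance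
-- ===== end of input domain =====

-- B replaces A's table-driven length-4/3/2 slice probes into two dicts by a hand-compiled
-- automaton: one dispatch on the current character with the multi-character rules unrolled
-- as explicit lookahead branches (objective: alternative, same cost).

-- ===== PORT A =====
-- Python str values are carried as List Char; MULTI_CHAR_MAP / SINGLE_CHAR_MAP as
-- insertion-ordered association lists (keys are distinct).
def multiCharMap : List (List Char × List Char) :=
  [ (['t','i','o','n'], ['ش','ن']), (['g','h','t'], ['ت']), (['p','h'], ['ف']),
    (['s','h'], ['ش']), (['c','h'], ['چ']), (['k','h'], ['خ']), (['g','h'], ['غ']),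
    (['t','h'], ['س']), (['z','h'], ['ژ']), (['o','o'], ['و','و']), (['e','e'], ['ی']),
    (['q','u'], ['ک','و']), (['c','k'], ['ک']) ]

def singleCharMap : List (List Char × List Char) :=
  [ (['a'], ['ا']), (['b'], ['ب']), (['c'], ['ک']), (['d'], ['د']), (['e'], ['ێ']),
    (['f'], ['ف']), (['g'], ['گ']), (['h'], ['ه']), (['i'], ['ی']), (['j'], ['ج']),
    (['k'], ['ک']), (['l'], ['ل']), (['m'], ['م']), (['n'], ['ن']), (['o'], ['ۆ']),
    (['p'], ['پ']), (['q'], ['ک']), (['r'], ['ڕ']), (['s'], ['س']), (['t'], ['ت']),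
    (['u'], ['و']), (['v'], ['ڤ']), (['w'], ['و']), (['x'], ['ک','س']), (['y'], ['ی']),
    (['z'], ['ز']) ]

-- 's in D' + 'D[s]': first (unique) pair with that key
def pvLookup (m : List (List Char × List Char)) (s : List Char) : Option (List Char) :=
  (m.find? (fun kv => kv.1 == s)).map (·.2)

-- the while-loop of A; word[i:i+l] is (w.drop i).take l for the natural index i
-- (exact: PySem.List.slice_natCast_add), word[i] is w.getD i default (0 ≤ i < n here)
def pvALoop (w : List Char) (n i : Nat) (res : List Char) : List Char :=
  if _h : i < n then
    match (if i + 4 ≤ n then pvLookup multiCharMap ((w.drop i).take 4) else none) with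
    | some v => pvALoop w n (i + 4) (res ++ v)
    | none =>
      match (if i + 3 ≤ n then pvLookup multiCharMap ((w.drop i).take 3) else none) with
      | some v => pvALoop w n (i + 3) (res ++ v)
      | none =>
        match (if i + 2 ≤ n then pvLookup multiCharMap ((w.drop i).take 2) else none) with
        | some v => pvALoop w n (i + 2) (res ++ v)
        | none =>
          match pvLookup singleCharMap [w.getD i default] with
          | some v => pvALoop w n (i + 1) (res ++ v)
          | none => pvALoop w n (i + 1) (res ++ [w.getD i default])
  else res
termination_by n - i
decreasing_by all_goals omega

def fallback_transliterate_py (word : String) : String :=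
  let w := (PySem.Str.lower word).toList
  let res0 : List Char :=
    match w with
    | [] => []
    | c :: _ => if c ∈ ['a','e','i','o','u'] then ['ئ'] else []
  String.ofList (pvALoop w w.length 0 res0)

-- ===== PORT B =====
-- the while-loop of B: c = w[i] is inlined as w.getD i default (0 ≤ i < n here);
-- w.startswith(key, i+1) is PySem.Chars.startswith (w.drop (i+1)) key (exact for 0 ≤ i+1)
def pvBLoop (w : List Char) (n i : Nat) (out : List (List Char)) : List (List Char) :=
  if _h : i < n then
    if w.getD i default = 'a' then pvBLoop w n (i+1) (out ++ [['ا']])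
    else if w.getD i default = 'b' then pvBLoop w n (i+1) (out ++ [['ب']])
    else if w.getD i default = 'c' then
      (if i + 1 < n ∧ w.getD (i+1) default = 'h' then pvBLoop w n (i+2) (out ++ [['چ']])
       else if i + 1 < n ∧ w.getD (i+1) default = 'k' then pvBLoop w n (i+2) (out ++ [['ک']])
       else pvBLoop w n (i+1) (out ++ [['ک']]))
    else if w.getD i default = 'd' then pvBLoop w n (i+1) (out ++ [['د']])
    else if w.getD i default = 'e' then
      (if i + 1 < n ∧ w.getD (i+1) default = 'e' then pvBLoop w n (i+2) (out ++ [['ی']])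
       else pvBLoop w n (i+1) (out ++ [['ێ']]))
    else if w.getD i default = 'f' then pvBLoop w n (i+1) (out ++ [['ف']])
    else if w.getD i default = 'g' then
      (if PySem.Chars.startswith (w.drop (i+1)) ['h','t'] = true then pvBLoop w n (i+3) (out ++ [['ت']])
       else if i + 1 < n ∧ w.getD (i+1) default = 'h' then pvBLoop w n (i+2) (out ++ [['غ']])
       else pvBLoop w n (i+1) (out ++ [['گ']]))
    else if w.getD i default = 'h' then pvBLoop w n (i+1) (out ++ [['ه']])
    else if w.getD i default = 'i' then pvBLoop w n (i+1) (out ++ [['ی']])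
    else if w.getD i default = 'j' then pvBLoop w n (i+1) (out ++ [['ج']])
    else if w.getD i default = 'k' then
      (if i + 1 < n ∧ w.getD (i+1) default = 'h' then pvBLoop w n (i+2) (out ++ [['خ']])
       else pvBLoop w n (i+1) (out ++ [['ک']]))
    else if w.getD i default = 'l' then pvBLoop w n (i+1) (out ++ [['ل']])
    else if w.getD i default = 'm' then pvBLoop w n (i+1) (out ++ [['م']])
    else if w.getD i default = 'n' then pvBLoop w n (i+1) (out ++ [['ن']])
    else if w.getD i default = 'o' then
      (if i + 1 < n ∧ w.getD (i+1) default = 'o' then pvBLoop w n (i+2) (out ++ [['و','و']])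
       else pvBLoop w n (i+1) (out ++ [['ۆ']]))
    else if w.getD i default = 'p' then
      (if i + 1 < n ∧ w.getD (i+1) default = 'h' then pvBLoop w n (i+2) (out ++ [['ف']])
       else pvBLoop w n (i+1) (out ++ [['پ']]))
    else if w.getD i default = 'q' then
      (if i + 1 < n ∧ w.getD (i+1) default = 'u' then pvBLoop w n (i+2) (out ++ [['ک','و']])
       else pvBLoop w n (i+1) (out ++ [['ک']]))
    else if w.getD i default = 'r' then pvBLoop w n (i+1) (out ++ [['ڕ']])
    else if w.getD i default = 's' then
      (if i + 1 < n ∧ w.getD (i+1) default = 'h' then pvBLoop w n (i+2) (out ++ [['ش']])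
       else pvBLoop w n (i+1) (out ++ [['س']]))
    else if w.getD i default = 't' then
      (if PySem.Chars.startswith (w.drop (i+1)) ['i','o','n'] = true then pvBLoop w n (i+4) (out ++ [['ش','ن']])
       else if i + 1 < n ∧ w.getD (i+1) default = 'h' then pvBLoop w n (i+2) (out ++ [['س']])
       else pvBLoop w n (i+1) (out ++ [['ت']]))
    else if w.getD i default = 'u' then pvBLoop w n (i+1) (out ++ [['و']])
    else if w.getD i default = 'v' then pvBLoop w n (i+1) (out ++ [['ڤ']])
    else if w.getD i default = 'w' then pvBLoop w n (i+1) (out ++ [['و']])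
    else if w.getD i default = 'x' then pvBLoop w n (i+1) (out ++ [['ک','س']])
    else if w.getD i default = 'y' then pvBLoop w n (i+1) (out ++ [['ی']])
    else if w.getD i default = 'z' then
      (if i + 1 < n ∧ w.getD (i+1) default = 'h' then pvBLoop w n (i+2) (out ++ [['ژ']])
       else pvBLoop w n (i+1) (out ++ [['ز']]))
    else pvBLoop w n (i+1) (out ++ [[w.getD i default]])
  else out
termination_by n - i
decreasing_by all_goals omega

def fallback_transliterate_py_alt (word : String) : String :=
  let w := (PySem.Str.lower word).toList
  let out0 : List (List Char) :=
    match w with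
    | [] => []
    | c :: _ => if c ∈ ['a','e','i','o','u'] then [['ئ']] else []
  String.ofList (PySem.Chars.join [] (pvBLoop w w.length 0 out0))   -- "".join(out)

-- ===== PRECONDITION & SPEC =====
def Spec_fallback_transliterate_py (word : String) (out : String) : Prop := out = fallback_transliterate_py_alt word
instance (word : String) (out : String) : Decidable (Spec_fallback_transliterate_py word out) := by unfold Spec_fallback_transliterate_py; infer_instance

-- ===== CLAIM (what is proved, stated in full; the proofs are below) =====
def Claim_equal_fallback_transliterate_py : Prop := ∀ (word : String), Dom_fallback_transliterate_py word → Spec_fallback_transliterate_py word (fallback_transliterate_py word)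

-- ===== LEMMAS AND PROOFS =====

lemma pvLookup_eq_none (m : List (List Char × List Char)) (s : List Char)
    (h : ∀ kv ∈ m, kv.1 ≠ s) : pvLookup m s = none := by
  have hf : m.find? (fun kv => kv.1 == s) = none :=
    List.find?_eq_none.mpr (fun kv hkv => by simpa using h kv hkv)
  simp [pvLookup, hf]

lemma probe_none (P : Prop) [Decidable P] (t : List Char)
    (h : pvLookup multiCharMap t = none) :
    (if P then pvLookup multiCharMap t else none) = none := by
  split
  · exact h
  · rfl

lemma multi_none (c : Char) (hc : c ∉ (['t','g','p','s','c','k','z','o','e','q'] : List Char))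
    (t : List Char) : pvLookup multiCharMap (c :: t) = none := by
  apply pvLookup_eq_none; intro kv hkv
  fin_cases hkv <;> (intro he; injection he with hh ht; subst hh; exact hc (by decide))

lemma multi_t (t : List Char) :
    pvLookup multiCharMap ('t' :: t) = if t = ['i','o','n'] then some ['ش','ن'] else if t = ['h'] then some ['س'] else none := by
  by_cases h1 : t = ['i','o','n']
  · subst h1; decide
  by_cases h2 : t = ['h']
  · subst h2; decide
  rw [if_neg h1, if_neg h2]
  apply pvLookup_eq_none; intro kv hkv
  fin_cases hkv <;> (intro he; injection he with hh ht) <;>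
    first | exact absurd hh (by decide) | exact h1 ht.symm | exact h2 ht.symm

lemma multi_g (t : List Char) :
    pvLookup multiCharMap ('g' :: t) = if t = ['h','t'] then some ['ت'] else if t = ['h'] then some ['غ'] else none := by
  by_cases h1 : t = ['h','t']
  · subst h1; decide
  by_cases h2 : t = ['h']
  · subst h2; decide
  rw [if_neg h1, if_neg h2]
  apply pvLookup_eq_none; intro kv hkv
  fin_cases hkv <;> (intro he; injection he with hh ht) <;>
    first | exact absurd hh (by decide) | exact h1 ht.symm | exact h2 ht.symm

lemma multi_c (t : List Char) :
    pvLookup multiCharMap ('c' :: t) = if t = ['h'] then some ['چ'] else if t = ['k'] then some ['ک'] else none := by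
  by_cases h1 : t = ['h']
  · subst h1; decide
  by_cases h2 : t = ['k']
  · subst h2; decide
  rw [if_neg h1, if_neg h2]
  apply pvLookup_eq_none; intro kv hkv
  fin_cases hkv <;> (intro he; injection he with hh ht) <;>
    first | exact absurd hh (by decide) | exact h1 ht.symm | exact h2 ht.symm

lemma multi_e (t : List Char) :
    pvLookup multiCharMap ('e' :: t) = if t = ['e'] then some ['ی'] else none := by
  by_cases h1 : t = ['e']
  · subst h1; decide
  rw [if_neg h1]
  apply pvLookup_eq_none; intro kv hkv
  fin_cases hkv <;> (intro he; injection he with hh ht) <;>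
    first | exact absurd hh (by decide) | exact h1 ht.symm

lemma multi_k (t : List Char) :
    pvLookup multiCharMap ('k' :: t) = if t = ['h'] then some ['خ'] else none := by
  by_cases h1 : t = ['h']
  · subst h1; decide
  rw [if_neg h1]
  apply pvLookup_eq_none; intro kv hkv
  fin_cases hkv <;> (intro he; injection he with hh ht) <;>
    first | exact absurd hh (by decide) | exact h1 ht.symm

lemma multi_o (t : List Char) :
    pvLookup multiCharMap ('o' :: t) = if t = ['o'] then some ['و','و'] else none := by
  by_cases h1 : t = ['o']
  · subst h1; decide
  rw [if_neg h1]
  apply pvLookup_eq_none; intro kv hkv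
  fin_cases hkv <;> (intro he; injection he with hh ht) <;>
    first | exact absurd hh (by decide) | exact h1 ht.symm

lemma multi_p (t : List Char) :
    pvLookup multiCharMap ('p' :: t) = if t = ['h'] then some ['ف'] else none := by
  by_cases h1 : t = ['h']
  · subst h1; decide
  rw [if_neg h1]
  apply pvLookup_eq_none; intro kv hkv
  fin_cases hkv <;> (intro he; injection he with hh ht) <;>
    first | exact absurd hh (by decide) | exact h1 ht.symm

lemma multi_q (t : List Char) :
    pvLookup multiCharMap ('q' :: t) = if t = ['u'] then some ['ک','و'] else none := by
  by_cases h1 : t = ['u']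
  · subst h1; decide
  rw [if_neg h1]
  apply pvLookup_eq_none; intro kv hkv
  fin_cases hkv <;> (intro he; injection he with hh ht) <;>
    first | exact absurd hh (by decide) | exact h1 ht.symm

lemma multi_s (t : List Char) :
    pvLookup multiCharMap ('s' :: t) = if t = ['h'] then some ['ش'] else none := by
  by_cases h1 : t = ['h']
  · subst h1; decide
  rw [if_neg h1]
  apply pvLookup_eq_none; intro kv hkv
  fin_cases hkv <;> (intro he; injection he with hh ht) <;>
    first | exact absurd hh (by decide) | exact h1 ht.symm

lemma multi_z (t : List Char) :
    pvLookup multiCharMap ('z' :: t) = if t = ['h'] then some ['ژ'] else none := by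
  by_cases h1 : t = ['h']
  · subst h1; decide
  rw [if_neg h1]
  apply pvLookup_eq_none; intro kv hkv
  fin_cases hkv <;> (intro he; injection he with hh ht) <;>
    first | exact absurd hh (by decide) | exact h1 ht.symm

lemma listBeq_comm (a b : List Char) : (a == b) = (b == a) := by
  cases h : (a == b) with
  | true => have := eq_of_beq h; subst this; simp
  | false =>
    have hne : ¬ b = a := by
      intro e; subst e; simp at h
    simp [beq_eq_false_iff_ne, hne]

lemma startswith_take (t k : List Char) : PySem.Chars.startswith t k = (t.take k.length == k) := by
  cases h : PySem.Chars.startswith t k with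
  | false =>
    symm; rw [listBeq_comm]; simp only [beq_eq_false_iff_ne]
    intro he
    have : k <+: t := List.prefix_iff_eq_take.mpr he
    rw [← PySem.Chars.startswith_iff] at this
    simp [this] at h
  | true =>
    rw [PySem.Chars.startswith_iff] at h
    rw [List.prefix_iff_eq_take] at h
    simp [← h]

lemma drop_cons (w : List Char) (i : Nat) (h : i < w.length) :
    w.drop i = w.getD i default :: w.drop (i + 1) := by
  rw [List.getD_eq_getElem w default h]
  exact List.drop_eq_getElem_cons h

lemma take_one_getD (w : List Char) (i : Nat) (h : i < w.length) :
    (w.drop i).take 1 = [w.getD i default] := by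
  rcases hd : w.drop i with _ | ⟨c, t⟩
  · have hl : (w.drop i).length = w.length - i := List.length_drop
    rw [hd] at hl; simp at hl; omega
  · have hg : w.getD i default = (w.drop i).headD default := by
      simp [List.getD, List.head?_drop]
    rw [hg, hd]; rfl

lemma take4_cons (a : Char) (l : List Char) : (a :: l).take 4 = a :: l.take 3 := rfl
lemma take3_cons (a : Char) (l : List Char) : (a :: l).take 3 = a :: l.take 2 := rfl
lemma take2_cons (a : Char) (l : List Char) : (a :: l).take 2 = a :: l.take 1 := rfl

lemma pvALoop_stop (w : List Char) (n i : Nat) (res : List Char) (hi : ¬ i < n) :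
    pvALoop w n i res = res := by
  rw [pvALoop]; simp [hi]

lemma pvBLoop_stop (w : List Char) (n i : Nat) (out : List (List Char)) (hi : ¬ i < n) :
    pvBLoop w n i out = out := by
  rw [pvBLoop]; simp [hi]

lemma pvALoop_unfold (w : List Char) (n i : Nat) (res : List Char) (hi : i < n) :
    pvALoop w n i res =
      match (if i + 4 ≤ n then pvLookup multiCharMap ((w.drop i).take 4) else none) with
      | some v => pvALoop w n (i + 4) (res ++ v)
      | none =>
        match (if i + 3 ≤ n then pvLookup multiCharMap ((w.drop i).take 3) else none) with
        | some v => pvALoop w n (i + 3) (res ++ v)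
        | none =>
          match (if i + 2 ≤ n then pvLookup multiCharMap ((w.drop i).take 2) else none) with
          | some v => pvALoop w n (i + 2) (res ++ v)
          | none =>
            match pvLookup singleCharMap [w.getD i default] with
            | some v => pvALoop w n (i + 1) (res ++ v)
            | none => pvALoop w n (i + 1) (res ++ [w.getD i default]) := by
  rw [pvALoop, dif_pos hi]

lemma join_nil_flatten (ps : List (List Char)) : PySem.Chars.join [] ps = ps.flatten := by
  unfold PySem.Chars.join
  induction ps with
  | nil => rfl
  | cons p ps ih => cases ps <;> simp_all [List.intercalate, List.intersperse]

-- the core loop equivalence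
lemma loop_eq (w : List Char) : ∀ (k i : Nat) (res : List Char) (parts : List (List Char)),
    w.length - i ≤ k → res = parts.flatten →
    pvALoop w w.length i res = (pvBLoop w w.length i parts).flatten := by
  intro k
  induction k with
  | zero =>
    intro i res parts hk hres
    have hi : ¬ i < w.length := by omega
    rw [pvALoop_stop _ _ _ _ hi, pvBLoop_stop _ _ _ _ hi, hres]
  | succ k ih =>
    intro i res parts hk hres
    by_cases hi : i < w.length
    case neg => rw [pvALoop_stop _ _ _ _ hi, pvBLoop_stop _ _ _ _ hi, hres]
    case pos =>
    have ih : ∀ (i : Nat) (res : List Char) (parts : List (List Char)),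
        w.length - i ≤ k → res = parts.flatten →
        pvALoop w w.length i res = (pvBLoop w w.length i parts).flatten := ih
    have hdrop := drop_cons w i hi
    rw [pvALoop_unfold _ _ _ _ hi, hdrop]
    simp only [take4_cons, take3_cons, take2_cons]
    rw [pvBLoop, dif_pos hi]
    by_cases hc0 : w.getD i default = 'a'
    · rw [hc0]
      rw [probe_none _ _ (multi_none 'a' (by decide) _)]
      rw [probe_none _ _ (multi_none 'a' (by decide) _)]
      rw [probe_none _ _ (multi_none 'a' (by decide) _)]
      rw [show pvLookup singleCharMap ['a'] = some ['ا'] from by decide]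
      rw [if_pos rfl]
      exact ih _ _ _ (by omega) (by simp [hres])
    by_cases hc1 : w.getD i default = 'b'
    · rw [hc1]
      rw [probe_none _ _ (multi_none 'b' (by decide) _)]
      rw [probe_none _ _ (multi_none 'b' (by decide) _)]
      rw [probe_none _ _ (multi_none 'b' (by decide) _)]
      rw [show pvLookup singleCharMap ['b'] = some ['ب'] from by decide]
      rw [if_neg (by decide : ¬(('b' : Char) = 'a')), if_pos rfl]
      exact ih _ _ _ (by omega) (by simp [hres])
    by_cases hc2 : w.getD i default = 'c'
    · rw [hc2]
      have hp4 : (if i + 4 ≤ w.length then pvLookup multiCharMap ('c' :: (w.drop (i+1)).take 3) else none) = none := by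
        split
        next hg =>
          have hne1 : ¬ ((w.drop (i+1)).take 3 = ['h']) := by intro he; have hl := congrArg List.length he; simp [List.length_take, List.length_drop] at hl; omega
          have hne2 : ¬ ((w.drop (i+1)).take 3 = ['k']) := by intro he; have hl := congrArg List.length he; simp [List.length_take, List.length_drop] at hl; omega
          rw [multi_c, if_neg hne1, if_neg hne2]
        next => rfl
      have hp3 : (if i + 3 ≤ w.length then pvLookup multiCharMap ('c' :: (w.drop (i+1)).take 2) else none) = none := by
        split
        next hg =>
          have hne1 : ¬ ((w.drop (i+1)).take 2 = ['h']) := by intro he; have hl := congrArg List.length he; simp [List.length_take, List.length_drop] at hl; omega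
          have hne2 : ¬ ((w.drop (i+1)).take 2 = ['k']) := by intro he; have hl := congrArg List.length he; simp [List.length_take, List.length_drop] at hl; omega
          rw [multi_c, if_neg hne1, if_neg hne2]
        next => rfl
      rw [hp4, hp3, if_neg (by decide : ¬(('c' : Char) = 'a')), if_neg (by decide : ¬(('c' : Char) = 'b')), if_pos rfl]
      by_cases hbh : i + 1 < w.length ∧ w.getD (i+1) default = 'h'
      · have hg2 : i + 2 ≤ w.length := by omega
        have ht1 : (w.drop (i+1)).take 1 = ['h'] := by rw [take_one_getD w (i+1) (by omega), hbh.2]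
        rw [if_pos hg2, ht1, multi_c, if_pos rfl, if_pos hbh]
        exact ih _ _ _ (by omega) (by simp [hres])
      by_cases hbk : i + 1 < w.length ∧ w.getD (i+1) default = 'k'
      · have hg2 : i + 2 ≤ w.length := by omega
        have ht1 : (w.drop (i+1)).take 1 = ['k'] := by rw [take_one_getD w (i+1) (by omega), hbk.2]
        rw [if_pos hg2, ht1, multi_c, if_neg (by decide : ¬((['k'] : List Char) = ['h'])), if_pos rfl, if_neg hbh, if_pos hbk]
        exact ih _ _ _ (by omega) (by simp [hres])
      · have hp2 : (if i + 2 ≤ w.length then pvLookup multiCharMap ('c' :: (w.drop (i+1)).take 1) else none) = none := by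
          split
          next hg =>
            rw [take_one_getD w (i+1) (by omega), multi_c, if_neg, if_neg]
            · intro he; injection he with hh ht; exact hbk ⟨by omega, hh⟩
            · intro he; injection he with hh ht; exact hbh ⟨by omega, hh⟩
          next => rfl
        rw [hp2, show pvLookup singleCharMap ['c'] = some ['ک'] from by decide, if_neg hbh, if_neg hbk]
        exact ih _ _ _ (by omega) (by simp [hres])
    by_cases hc3 : w.getD i default = 'd'
    · rw [hc3]
      rw [probe_none _ _ (multi_none 'd' (by decide) _)]
      rw [probe_none _ _ (multi_none 'd' (by decide) _)]
      rw [probe_none _ _ (multi_none 'd' (by decide) _)]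
      rw [show pvLookup singleCharMap ['d'] = some ['د'] from by decide]
      rw [if_neg (by decide : ¬(('d' : Char) = 'a')), if_neg (by decide : ¬(('d' : Char) = 'b')), if_neg (by decide : ¬(('d' : Char) = 'c')), if_pos rfl]
      exact ih _ _ _ (by omega) (by simp [hres])
    by_cases hc4 : w.getD i default = 'e'
    · rw [hc4]
      have hp4 : (if i + 4 ≤ w.length then pvLookup multiCharMap ('e' :: (w.drop (i+1)).take 3) else none) = none := by
        split
        next hg =>
          have hne1 : ¬ ((w.drop (i+1)).take 3 = ['e']) := by intro he; have hl := congrArg List.length he; simp [List.length_take, List.length_drop] at hl; omega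
          rw [multi_e, if_neg hne1]
        next => rfl
      have hp3 : (if i + 3 ≤ w.length then pvLookup multiCharMap ('e' :: (w.drop (i+1)).take 2) else none) = none := by
        split
        next hg =>
          have hne1 : ¬ ((w.drop (i+1)).take 2 = ['e']) := by intro he; have hl := congrArg List.length he; simp [List.length_take, List.length_drop] at hl; omega
          rw [multi_e, if_neg hne1]
        next => rfl
      rw [hp4, hp3, if_neg (by decide : ¬(('e' : Char) = 'a')), if_neg (by decide : ¬(('e' : Char) = 'b')), if_neg (by decide : ¬(('e' : Char) = 'c')), if_neg (by decide : ¬(('e' : Char) = 'd')), if_pos rfl]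
      by_cases hb : i + 1 < w.length ∧ w.getD (i+1) default = 'e'
      · have hg2 : i + 2 ≤ w.length := by omega
        have ht1 : (w.drop (i+1)).take 1 = ['e'] := by rw [take_one_getD w (i+1) (by omega), hb.2]
        rw [if_pos hg2, ht1, multi_e, if_pos rfl, if_pos hb]
        exact ih _ _ _ (by omega) (by simp [hres])
      · have hp2 : (if i + 2 ≤ w.length then pvLookup multiCharMap ('e' :: (w.drop (i+1)).take 1) else none) = none := by
          split
          next hg =>
            rw [take_one_getD w (i+1) (by omega), multi_e, if_neg]
            intro he; injection he with hh ht; exact hb ⟨by omega, hh⟩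
          next => rfl
        rw [hp2, show pvLookup singleCharMap ['e'] = some ['ێ'] from by decide, if_neg hb]
        exact ih _ _ _ (by omega) (by simp [hres])
    by_cases hc5 : w.getD i default = 'f'
    · rw [hc5]
      rw [probe_none _ _ (multi_none 'f' (by decide) _)]
      rw [probe_none _ _ (multi_none 'f' (by decide) _)]
      rw [probe_none _ _ (multi_none 'f' (by decide) _)]
      rw [show pvLookup singleCharMap ['f'] = some ['ف'] from by decide]
      rw [if_neg (by decide : ¬(('f' : Char) = 'a')), if_neg (by decide : ¬(('f' : Char) = 'b')), if_neg (by decide : ¬(('f' : Char) = 'c')), if_neg (by decide : ¬(('f' : Char) = 'd')), if_neg (by decide : ¬(('f' : Char) = 'e')), if_pos rfl]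
      exact ih _ _ _ (by omega) (by simp [hres])
    by_cases hc6 : w.getD i default = 'g'
    · rw [hc6]
      have hp4 : (if i + 4 ≤ w.length then pvLookup multiCharMap ('g' :: (w.drop (i+1)).take 3) else none) = none := by
        split
        next hg =>
          have hne1 : ¬ ((w.drop (i+1)).take 3 = ['h','t']) := by intro he; have hl := congrArg List.length he; simp [List.length_take, List.length_drop] at hl; omega
          have hne2 : ¬ ((w.drop (i+1)).take 3 = ['h']) := by intro he; have hl := congrArg List.length he; simp [List.length_take, List.length_drop] at hl; omega
          rw [multi_g, if_neg hne1, if_neg hne2]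
        next => rfl
      rw [hp4]
      by_cases hsw : PySem.Chars.startswith (w.drop (i+1)) ['h','t'] = true
      · have htk : (w.drop (i+1)).take 2 = ['h','t'] := by
          have h' : PySem.Chars.startswith (w.drop (i+1)) ['h','t'] = (((w.drop (i+1)).take 2) == ['h','t']) := startswith_take _ _
          rw [hsw] at h'; exact eq_of_beq h'.symm
        have hlen : i + 3 ≤ w.length := by
          have hl := congrArg List.length htk; simp [List.length_take, List.length_drop] at hl; omega
        rw [if_pos hlen, multi_g, if_pos htk, if_neg (by decide : ¬(('g' : Char) = 'a')), if_neg (by decide : ¬(('g' : Char) = 'b')), if_neg (by decide : ¬(('g' : Char) = 'c')), if_neg (by decide : ¬(('g' : Char) = 'd')), if_neg (by decide : ¬(('g' : Char) = 'e')), if_neg (by decide : ¬(('g' : Char) = 'f')), if_pos rfl, if_pos hsw]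
        exact ih _ _ _ (by omega) (by simp [hres])
      ·
        have hp3 : (if i + 3 ≤ w.length then pvLookup multiCharMap ('g' :: (w.drop (i+1)).take 2) else none) = none := by
          split
          next hg =>
            have hne1 : ¬ ((w.drop (i+1)).take 2 = ['h','t']) := by intro he; exact hsw (by rw [show PySem.Chars.startswith (w.drop (i+1)) ['h','t'] = (((w.drop (i+1)).take 2) == ['h','t']) from startswith_take _ _, he]; rfl)
            have hne2 : ¬ ((w.drop (i+1)).take 2 = ['h']) := by intro he; have hl := congrArg List.length he; simp [List.length_take, List.length_drop] at hl; omega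
            rw [multi_g, if_neg hne1, if_neg hne2]
          next => rfl
        rw [hp3, if_neg (by decide : ¬(('g' : Char) = 'a')), if_neg (by decide : ¬(('g' : Char) = 'b')), if_neg (by decide : ¬(('g' : Char) = 'c')), if_neg (by decide : ¬(('g' : Char) = 'd')), if_neg (by decide : ¬(('g' : Char) = 'e')), if_neg (by decide : ¬(('g' : Char) = 'f')), if_pos rfl, if_neg hsw]
        by_cases hb : i + 1 < w.length ∧ w.getD (i+1) default = 'h'
        · have hg2 : i + 2 ≤ w.length := by omega
          have ht1 : (w.drop (i+1)).take 1 = ['h'] := by rw [take_one_getD w (i+1) (by omega), hb.2]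
          rw [if_pos hg2, ht1, multi_g, if_neg (by decide : ¬((['h'] : List Char) = ['h','t'])), if_pos rfl, if_pos hb]
          exact ih _ _ _ (by omega) (by simp [hres])
        · have hp2 : (if i + 2 ≤ w.length then pvLookup multiCharMap ('g' :: (w.drop (i+1)).take 1) else none) = none := by
            split
            next hg =>
              have hne1 : ¬ ((w.drop (i+1)).take 1 = ['h','t']) := by intro he; have hl := congrArg List.length he; simp [List.length_take, List.length_drop] at hl; omega
              rw [take_one_getD w (i+1) (by omega)] at hne1 ⊢
              rw [multi_g, if_neg hne1, if_neg]
              intro he; injection he with hh ht; exact hb ⟨by omega, hh⟩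
            next => rfl
          rw [hp2, show pvLookup singleCharMap ['g'] = some ['گ'] from by decide, if_neg hb]
          exact ih _ _ _ (by omega) (by simp [hres])
    by_cases hc7 : w.getD i default = 'h'
    · rw [hc7]
      rw [probe_none _ _ (multi_none 'h' (by decide) _)]
      rw [probe_none _ _ (multi_none 'h' (by decide) _)]
      rw [probe_none _ _ (multi_none 'h' (by decide) _)]
      rw [show pvLookup singleCharMap ['h'] = some ['ه'] from by decide]
      rw [if_neg (by decide : ¬(('h' : Char) = 'a')), if_neg (by decide : ¬(('h' : Char) = 'b')), if_neg (by decide : ¬(('h' : Char) = 'c')), if_neg (by decide : ¬(('h' : Char) = 'd')), if_neg (by decide : ¬(('h' : Char) = 'e')), if_neg (by decide : ¬(('h' : Char) = 'f')), if_neg (by decide : ¬(('h' : Char) = 'g')), if_pos rfl]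
      exact ih _ _ _ (by omega) (by simp [hres])
    by_cases hc8 : w.getD i default = 'i'
    · rw [hc8]
      rw [probe_none _ _ (multi_none 'i' (by decide) _)]
      rw [probe_none _ _ (multi_none 'i' (by decide) _)]
      rw [probe_none _ _ (multi_none 'i' (by decide) _)]
      rw [show pvLookup singleCharMap ['i'] = some ['ی'] from by decide]
      rw [if_neg (by decide : ¬(('i' : Char) = 'a')), if_neg (by decide : ¬(('i' : Char) = 'b')), if_neg (by decide : ¬(('i' : Char) = 'c')), if_neg (by decide : ¬(('i' : Char) = 'd')), if_neg (by decide : ¬(('i' : Char) = 'e')), if_neg (by decide : ¬(('i' : Char) = 'f')), if_neg (by decide : ¬(('i' : Char) = 'g')), if_neg (by decide : ¬(('i' : Char) = 'h')), if_pos rfl]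
      exact ih _ _ _ (by omega) (by simp [hres])
    by_cases hc9 : w.getD i default = 'j'
    · rw [hc9]
      rw [probe_none _ _ (multi_none 'j' (by decide) _)]
      rw [probe_none _ _ (multi_none 'j' (by decide) _)]
      rw [probe_none _ _ (multi_none 'j' (by decide) _)]
      rw [show pvLookup singleCharMap ['j'] = some ['ج'] from by decide]
      rw [if_neg (by decide : ¬(('j' : Char) = 'a')), if_neg (by decide : ¬(('j' : Char) = 'b')), if_neg (by decide : ¬(('j' : Char) = 'c')), if_neg (by decide : ¬(('j' : Char) = 'd')), if_neg (by decide : ¬(('j' : Char) = 'e')), if_neg (by decide : ¬(('j' : Char) = 'f')), if_neg (by decide : ¬(('j' : Char) = 'g')), if_neg (by decide : ¬(('j' : Char) = 'h')), if_neg (by decide : ¬(('j' : Char) = 'i')), if_pos rfl]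
      exact ih _ _ _ (by omega) (by simp [hres])
    by_cases hc10 : w.getD i default = 'k'
    · rw [hc10]
      have hp4 : (if i + 4 ≤ w.length then pvLookup multiCharMap ('k' :: (w.drop (i+1)).take 3) else none) = none := by
        split
        next hg =>
          have hne1 : ¬ ((w.drop (i+1)).take 3 = ['h']) := by intro he; have hl := congrArg List.length he; simp [List.length_take, List.length_drop] at hl; omega
          rw [multi_k, if_neg hne1]
        next => rfl
      have hp3 : (if i + 3 ≤ w.length then pvLookup multiCharMap ('k' :: (w.drop (i+1)).take 2) else none) = none := by
        split
        next hg =>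
          have hne1 : ¬ ((w.drop (i+1)).take 2 = ['h']) := by intro he; have hl := congrArg List.length he; simp [List.length_take, List.length_drop] at hl; omega
          rw [multi_k, if_neg hne1]
        next => rfl
      rw [hp4, hp3, if_neg (by decide : ¬(('k' : Char) = 'a')), if_neg (by decide : ¬(('k' : Char) = 'b')), if_neg (by decide : ¬(('k' : Char) = 'c')), if_neg (by decide : ¬(('k' : Char) = 'd')), if_neg (by decide : ¬(('k' : Char) = 'e')), if_neg (by decide : ¬(('k' : Char) = 'f')), if_neg (by decide : ¬(('k' : Char) = 'g')), if_neg (by decide : ¬(('k' : Char) = 'h')), if_neg (by decide : ¬(('k' : Char) = 'i')), if_neg (by decide : ¬(('k' : Char) = 'j')), if_pos rfl]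
      by_cases hb : i + 1 < w.length ∧ w.getD (i+1) default = 'h'
      · have hg2 : i + 2 ≤ w.length := by omega
        have ht1 : (w.drop (i+1)).take 1 = ['h'] := by rw [take_one_getD w (i+1) (by omega), hb.2]
        rw [if_pos hg2, ht1, multi_k, if_pos rfl, if_pos hb]
        exact ih _ _ _ (by omega) (by simp [hres])
      · have hp2 : (if i + 2 ≤ w.length then pvLookup multiCharMap ('k' :: (w.drop (i+1)).take 1) else none) = none := by
          split
          next hg =>
            rw [take_one_getD w (i+1) (by omega), multi_k, if_neg]
            intro he; injection he with hh ht; exact hb ⟨by omega, hh⟩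
          next => rfl
        rw [hp2, show pvLookup singleCharMap ['k'] = some ['ک'] from by decide, if_neg hb]
        exact ih _ _ _ (by omega) (by simp [hres])
    by_cases hc11 : w.getD i default = 'l'
    · rw [hc11]
      rw [probe_none _ _ (multi_none 'l' (by decide) _)]
      rw [probe_none _ _ (multi_none 'l' (by decide) _)]
      rw [probe_none _ _ (multi_none 'l' (by decide) _)]
      rw [show pvLookup singleCharMap ['l'] = some ['ل'] from by decide]
      rw [if_neg (by decide : ¬(('l' : Char) = 'a')), if_neg (by decide : ¬(('l' : Char) = 'b')), if_neg (by decide : ¬(('l' : Char) = 'c')), if_neg (by decide : ¬(('l' : Char) = 'd')), if_neg (by decide : ¬(('l' : Char) = 'e')), if_neg (by decide : ¬(('l' : Char) = 'f')), if_neg (by decide : ¬(('l' : Char) = 'g')), if_neg (by decide : ¬(('l' : Char) = 'h')), if_neg (by decide : ¬(('l' : Char) = 'i')), if_neg (by decide : ¬(('l' : Char) = 'j')), if_neg (by decide : ¬(('l' : Char) = 'k')), if_pos rfl]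
      exact ih _ _ _ (by omega) (by simp [hres])
    by_cases hc12 : w.getD i default = 'm'
    · rw [hc12]
      rw [probe_none _ _ (multi_none 'm' (by decide) _)]
      rw [probe_none _ _ (multi_none 'm' (by decide) _)]
      rw [probe_none _ _ (multi_none 'm' (by decide) _)]
      rw [show pvLookup singleCharMap ['m'] = some ['م'] from by decide]
      rw [if_neg (by decide : ¬(('m' : Char) = 'a')), if_neg (by decide : ¬(('m' : Char) = 'b')), if_neg (by decide : ¬(('m' : Char) = 'c')), if_neg (by decide : ¬(('m' : Char) = 'd')), if_neg (by decide : ¬(('m' : Char) = 'e')), if_neg (by decide : ¬(('m' : Char) = 'f')), if_neg (by decide : ¬(('m' : Char) = 'g')), if_neg (by decide : ¬(('m' : Char) = 'h')), if_neg (by decide : ¬(('m' : Char) = 'i')), if_neg (by decide : ¬(('m' : Char) = 'j')), if_neg (by decide : ¬(('m' : Char) = 'k')), if_neg (by decide : ¬(('m' : Char) = 'l')), if_pos rfl]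
      exact ih _ _ _ (by omega) (by simp [hres])
    by_cases hc13 : w.getD i default = 'n'
    · rw [hc13]
      rw [probe_none _ _ (multi_none 'n' (by decide) _)]
      rw [probe_none _ _ (multi_none 'n' (by decide) _)]
      rw [probe_none _ _ (multi_none 'n' (by decide) _)]
      rw [show pvLookup singleCharMap ['n'] = some ['ن'] from by decide]
      rw [if_neg (by decide : ¬(('n' : Char) = 'a')), if_neg (by decide : ¬(('n' : Char) = 'b')), if_neg (by decide : ¬(('n' : Char) = 'c')), if_neg (by decide : ¬(('n' : Char) = 'd')), if_neg (by decide : ¬(('n' : Char) = 'e')), if_neg (by decide : ¬(('n' : Char) = 'f')), if_neg (by decide : ¬(('n' : Char) = 'g')), if_neg (by decide : ¬(('n' : Char) = 'h')), if_neg (by decide : ¬(('n' : Char) = 'i')), if_neg (by decide : ¬(('n' : Char) = 'j')), if_neg (by decide : ¬(('n' : Char) = 'k')), if_neg (by decide : ¬(('n' : Char) = 'l')), if_neg (by decide : ¬(('n' : Char) = 'm')), if_pos rfl]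
      exact ih _ _ _ (by omega) (by simp [hres])
    by_cases hc14 : w.getD i default = 'o'
    · rw [hc14]
      have hp4 : (if i + 4 ≤ w.length then pvLookup multiCharMap ('o' :: (w.drop (i+1)).take 3) else none) = none := by
        split
        next hg =>
          have hne1 : ¬ ((w.drop (i+1)).take 3 = ['o']) := by intro he; have hl := congrArg List.length he; simp [List.length_take, List.length_drop] at hl; omega
          rw [multi_o, if_neg hne1]
        next => rfl
      have hp3 : (if i + 3 ≤ w.length then pvLookup multiCharMap ('o' :: (w.drop (i+1)).take 2) else none) = none := by
        split
        next hg =>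
          have hne1 : ¬ ((w.drop (i+1)).take 2 = ['o']) := by intro he; have hl := congrArg List.length he; simp [List.length_take, List.length_drop] at hl; omega
          rw [multi_o, if_neg hne1]
        next => rfl
      rw [hp4, hp3, if_neg (by decide : ¬(('o' : Char) = 'a')), if_neg (by decide : ¬(('o' : Char) = 'b')), if_neg (by decide : ¬(('o' : Char) = 'c')), if_neg (by decide : ¬(('o' : Char) = 'd')), if_neg (by decide : ¬(('o' : Char) = 'e')), if_neg (by decide : ¬(('o' : Char) = 'f')), if_neg (by decide : ¬(('o' : Char) = 'g')), if_neg (by decide : ¬(('o' : Char) = 'h')), if_neg (by decide : ¬(('o' : Char) = 'i')), if_neg (by decide : ¬(('o' : Char) = 'j')), if_neg (by decide : ¬(('o' : Char) = 'k')), if_neg (by decide : ¬(('o' : Char) = 'l')), if_neg (by decide : ¬(('o' : Char) = 'm')), if_neg (by decide : ¬(('o' : Char) = 'n')), if_pos rfl]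
      by_cases hb : i + 1 < w.length ∧ w.getD (i+1) default = 'o'
      · have hg2 : i + 2 ≤ w.length := by omega
        have ht1 : (w.drop (i+1)).take 1 = ['o'] := by rw [take_one_getD w (i+1) (by omega), hb.2]
        rw [if_pos hg2, ht1, multi_o, if_pos rfl, if_pos hb]
        exact ih _ _ _ (by omega) (by simp [hres])
      · have hp2 : (if i + 2 ≤ w.length then pvLookup multiCharMap ('o' :: (w.drop (i+1)).take 1) else none) = none := by
          split
          next hg =>
            rw [take_one_getD w (i+1) (by omega), multi_o, if_neg]
            intro he; injection he with hh ht; exact hb ⟨by omega, hh⟩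
          next => rfl
        rw [hp2, show pvLookup singleCharMap ['o'] = some ['ۆ'] from by decide, if_neg hb]
        exact ih _ _ _ (by omega) (by simp [hres])
    by_cases hc15 : w.getD i default = 'p'
    · rw [hc15]
      have hp4 : (if i + 4 ≤ w.length then pvLookup multiCharMap ('p' :: (w.drop (i+1)).take 3) else none) = none := by
        split
        next hg =>
          have hne1 : ¬ ((w.drop (i+1)).take 3 = ['h']) := by intro he; have hl := congrArg List.length he; simp [List.length_take, List.length_drop] at hl; omega
          rw [multi_p, if_neg hne1]
        next => rfl
      have hp3 : (if i + 3 ≤ w.length then pvLookup multiCharMap ('p' :: (w.drop (i+1)).take 2) else none) = none := by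
        split
        next hg =>
          have hne1 : ¬ ((w.drop (i+1)).take 2 = ['h']) := by intro he; have hl := congrArg List.length he; simp [List.length_take, List.length_drop] at hl; omega
          rw [multi_p, if_neg hne1]
        next => rfl
      rw [hp4, hp3, if_neg (by decide : ¬(('p' : Char) = 'a')), if_neg (by decide : ¬(('p' : Char) = 'b')), if_neg (by decide : ¬(('p' : Char) = 'c')), if_neg (by decide : ¬(('p' : Char) = 'd')), if_neg (by decide : ¬(('p' : Char) = 'e')), if_neg (by decide : ¬(('p' : Char) = 'f')), if_neg (by decide : ¬(('p' : Char) = 'g')), if_neg (by decide : ¬(('p' : Char) = 'h')), if_neg (by decide : ¬(('p' : Char) = 'i')), if_neg (by decide : ¬(('p' : Char) = 'j')), if_neg (by decide : ¬(('p' : Char) = 'k')), if_neg (by decide : ¬(('p' : Char) = 'l')), if_neg (by decide : ¬(('p' : Char) = 'm')), if_neg (by decide : ¬(('p' : Char) = 'n')), if_neg (by decide : ¬(('p' : Char) = 'o')), if_pos rfl]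
      by_cases hb : i + 1 < w.length ∧ w.getD (i+1) default = 'h'
      · have hg2 : i + 2 ≤ w.length := by omega
        have ht1 : (w.drop (i+1)).take 1 = ['h'] := by rw [take_one_getD w (i+1) (by omega), hb.2]
        rw [if_pos hg2, ht1, multi_p, if_pos rfl, if_pos hb]
        exact ih _ _ _ (by omega) (by simp [hres])
      · have hp2 : (if i + 2 ≤ w.length then pvLookup multiCharMap ('p' :: (w.drop (i+1)).take 1) else none) = none := by
          split
          next hg =>
            rw [take_one_getD w (i+1) (by omega), multi_p, if_neg]
            intro he; injection he with hh ht; exact hb ⟨by omega, hh⟩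
          next => rfl
        rw [hp2, show pvLookup singleCharMap ['p'] = some ['پ'] from by decide, if_neg hb]
        exact ih _ _ _ (by omega) (by simp [hres])
    by_cases hc16 : w.getD i default = 'q'
    · rw [hc16]
      have hp4 : (if i + 4 ≤ w.length then pvLookup multiCharMap ('q' :: (w.drop (i+1)).take 3) else none) = none := by
        split
        next hg =>
          have hne1 : ¬ ((w.drop (i+1)).take 3 = ['u']) := by intro he; have hl := congrArg List.length he; simp [List.length_take, List.length_drop] at hl; omega
          rw [multi_q, if_neg hne1]
        next => rfl
      have hp3 : (if i + 3 ≤ w.length then pvLookup multiCharMap ('q' :: (w.drop (i+1)).take 2) else none) = none := by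
        split
        next hg =>
          have hne1 : ¬ ((w.drop (i+1)).take 2 = ['u']) := by intro he; have hl := congrArg List.length he; simp [List.length_take, List.length_drop] at hl; omega
          rw [multi_q, if_neg hne1]
        next => rfl
      rw [hp4, hp3, if_neg (by decide : ¬(('q' : Char) = 'a')), if_neg (by decide : ¬(('q' : Char) = 'b')), if_neg (by decide : ¬(('q' : Char) = 'c')), if_neg (by decide : ¬(('q' : Char) = 'd')), if_neg (by decide : ¬(('q' : Char) = 'e')), if_neg (by decide : ¬(('q' : Char) = 'f')), if_neg (by decide : ¬(('q' : Char) = 'g')), if_neg (by decide : ¬(('q' : Char) = 'h')), if_neg (by decide : ¬(('q' : Char) = 'i')), if_neg (by decide : ¬(('q' : Char) = 'j')), if_neg (by decide : ¬(('q' : Char) = 'k')), if_neg (by decide : ¬(('q' : Char) = 'l')), if_neg (by decide : ¬(('q' : Char) = 'm')), if_neg (by decide : ¬(('q' : Char) = 'n')), if_neg (by decide : ¬(('q' : Char) = 'o')), if_neg (by decide : ¬(('q' : Char) = 'p')), if_pos rfl]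
      by_cases hb : i + 1 < w.length ∧ w.getD (i+1) default = 'u'
      · have hg2 : i + 2 ≤ w.length := by omega
        have ht1 : (w.drop (i+1)).take 1 = ['u'] := by rw [take_one_getD w (i+1) (by omega), hb.2]
        rw [if_pos hg2, ht1, multi_q, if_pos rfl, if_pos hb]
        exact ih _ _ _ (by omega) (by simp [hres])
      · have hp2 : (if i + 2 ≤ w.length then pvLookup multiCharMap ('q' :: (w.drop (i+1)).take 1) else none) = none := by
          split
          next hg =>
            rw [take_one_getD w (i+1) (by omega), multi_q, if_neg]
            intro he; injection he with hh ht; exact hb ⟨by omega, hh⟩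
          next => rfl
        rw [hp2, show pvLookup singleCharMap ['q'] = some ['ک'] from by decide, if_neg hb]
        exact ih _ _ _ (by omega) (by simp [hres])
    by_cases hc17 : w.getD i default = 'r'
    · rw [hc17]
      rw [probe_none _ _ (multi_none 'r' (by decide) _)]
      rw [probe_none _ _ (multi_none 'r' (by decide) _)]
      rw [probe_none _ _ (multi_none 'r' (by decide) _)]
      rw [show pvLookup singleCharMap ['r'] = some ['ڕ'] from by decide]
      rw [if_neg (by decide : ¬(('r' : Char) = 'a')), if_neg (by decide : ¬(('r' : Char) = 'b')), if_neg (by decide : ¬(('r' : Char) = 'c')), if_neg (by decide : ¬(('r' : Char) = 'd')), if_neg (by decide : ¬(('r' : Char) = 'e')), if_neg (by decide : ¬(('r' : Char) = 'f')), if_neg (by decide : ¬(('r' : Char) = 'g')), if_neg (by decide : ¬(('r' : Char) = 'h')), if_neg (by decide : ¬(('r' : Char) = 'i')), if_neg (by decide : ¬(('r' : Char) = 'j')), if_neg (by decide : ¬(('r' : Char) = 'k')), if_neg (by decide : ¬(('r' : Char) = 'l')), if_neg (by decide : ¬(('r' : Char) = 'm')), if_neg (by decide : ¬(('r' : Char)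 = 'n')), if_neg (by decide : ¬(('r' : Char) = 'o')), if_neg (by decide : ¬(('r' : Char) = 'p')), if_neg (by decide : ¬(('r' : Char) = 'q')), if_pos rfl]
      exact ih _ _ _ (by omega) (by simp [hres])
    by_cases hc18 : w.getD i default = 's'
    · rw [hc18]
      have hp4 : (if i + 4 ≤ w.length then pvLookup multiCharMap ('s' :: (w.drop (i+1)).take 3) else none) = none := by
        split
        next hg =>
          have hne1 : ¬ ((w.drop (i+1)).take 3 = ['h']) := by intro he; have hl := congrArg List.length he; simp [List.length_take, List.length_drop] at hl; omega
          rw [multi_s, if_neg hne1]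
        next => rfl
      have hp3 : (if i + 3 ≤ w.length then pvLookup multiCharMap ('s' :: (w.drop (i+1)).take 2) else none) = none := by
        split
        next hg =>
          have hne1 : ¬ ((w.drop (i+1)).take 2 = ['h']) := by intro he; have hl := congrArg List.length he; simp [List.length_take, List.length_drop] at hl; omega
          rw [multi_s, if_neg hne1]
        next => rfl
      rw [hp4, hp3, if_neg (by decide : ¬(('s' : Char) = 'a')), if_neg (by decide : ¬(('s' : Char) = 'b')), if_neg (by decide : ¬(('s' : Char) = 'c')), if_neg (by decide : ¬(('s' : Char) = 'd')), if_neg (by decide : ¬(('s' : Char) = 'e')), if_neg (by decide : ¬(('s' : Char) = 'f')), if_neg (by decide : ¬(('s' : Char) = 'g')), if_neg (by decide : ¬(('s' : Char) = 'h')), if_neg (by decide : ¬(('s' : Char) = 'i')), if_neg (by decide : ¬(('s' : Char) = 'j')), if_neg (by decide : ¬(('s' : Char) = 'k')), if_neg (by decide : ¬(('s' : Char) = 'l')), if_neg (by decide : ¬(('s' : Char) = 'm')), if_neg (by decide : ¬(('s' : Char) = 'n')), if_neg (by decide : ¬(('s' : Char) = 'o')), if_neg (by decide : ¬(('s' : Char)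 = 'p')), if_neg (by decide : ¬(('s' : Char) = 'q')), if_neg (by decide : ¬(('s' : Char) = 'r')), if_pos rfl]
      by_cases hb : i + 1 < w.length ∧ w.getD (i+1) default = 'h'
      · have hg2 : i + 2 ≤ w.length := by omega
        have ht1 : (w.drop (i+1)).take 1 = ['h'] := by rw [take_one_getD w (i+1) (by omega), hb.2]
        rw [if_pos hg2, ht1, multi_s, if_pos rfl, if_pos hb]
        exact ih _ _ _ (by omega) (by simp [hres])
      · have hp2 : (if i + 2 ≤ w.length then pvLookup multiCharMap ('s' :: (w.drop (i+1)).take 1) else none) = none := by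
          split
          next hg =>
            rw [take_one_getD w (i+1) (by omega), multi_s, if_neg]
            intro he; injection he with hh ht; exact hb ⟨by omega, hh⟩
          next => rfl
        rw [hp2, show pvLookup singleCharMap ['s'] = some ['س'] from by decide, if_neg hb]
        exact ih _ _ _ (by omega) (by simp [hres])
    by_cases hc19 : w.getD i default = 't'
    · rw [hc19]
      by_cases hsw : PySem.Chars.startswith (w.drop (i+1)) ['i','o','n'] = true
      · have htk : (w.drop (i+1)).take 3 = ['i','o','n'] := by
          have h' : PySem.Chars.startswith (w.drop (i+1)) ['i','o','n'] = (((w.drop (i+1)).take 3) == ['i','o','n']) := startswith_take _ _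
          rw [hsw] at h'; exact eq_of_beq h'.symm
        have hlen : i + 4 ≤ w.length := by
          have hl := congrArg List.length htk; simp [List.length_take, List.length_drop] at hl; omega
        rw [if_pos hlen, multi_t, if_pos htk, if_neg (by decide : ¬(('t' : Char) = 'a')), if_neg (by decide : ¬(('t' : Char) = 'b')), if_neg (by decide : ¬(('t' : Char) = 'c')), if_neg (by decide : ¬(('t' : Char) = 'd')), if_neg (by decide : ¬(('t' : Char) = 'e')), if_neg (by decide : ¬(('t' : Char) = 'f')), if_neg (by decide : ¬(('t' : Char) = 'g')), if_neg (by decide : ¬(('t' : Char) = 'h')), if_neg (by decide : ¬(('t' : Char) = 'i')), if_neg (by decide : ¬(('t' : Char) = 'j')), if_neg (by decide : ¬(('t' : Char) = 'k')), if_neg (by decide : ¬(('t' : Char) = 'l')), if_neg (by decide : ¬(('t' : Char) = 'm')), if_neg (by decide : ¬(('t' : Char) = 'n')), if_neg (by decide : ¬(('t' : Char) = 'o')), if_neg (by decide : ¬(('t' : Char) = 'p')), if_neg (by decide : ¬(('t' : Char) = 'q')), if_neg (by decide : ¬(('t' : Char) = 'r')), if_neg (by decide : ¬(('t' : Char) =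 's')), if_pos rfl, if_pos hsw]
        exact ih _ _ _ (by omega) (by simp [hres])
      ·
        have hp4 : (if i + 4 ≤ w.length then pvLookup multiCharMap ('t' :: (w.drop (i+1)).take 3) else none) = none := by
          split
          next hg =>
            have hne1 : ¬ ((w.drop (i+1)).take 3 = ['i','o','n']) := by intro he; exact hsw (by rw [show PySem.Chars.startswith (w.drop (i+1)) ['i','o','n'] = (((w.drop (i+1)).take 3) == ['i','o','n']) from startswith_take _ _, he]; rfl)
            have hne2 : ¬ ((w.drop (i+1)).take 3 = ['h']) := by intro he; have hl := congrArg List.length he; simp [List.length_take, List.length_drop] at hl; omega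
            rw [multi_t, if_neg hne1, if_neg hne2]
          next => rfl
        have hp3 : (if i + 3 ≤ w.length then pvLookup multiCharMap ('t' :: (w.drop (i+1)).take 2) else none) = none := by
          split
          next hg =>
            have hne1 : ¬ ((w.drop (i+1)).take 2 = ['i','o','n']) := by intro he; have hl := congrArg List.length he; simp [List.length_take, List.length_drop] at hl; omega
            have hne2 : ¬ ((w.drop (i+1)).take 2 = ['h']) := by intro he; have hl := congrArg List.length he; simp [List.length_take, List.length_drop] at hl; omega
            rw [multi_t, if_neg hne1, if_neg hne2]
          next => rfl
        rw [hp4, hp3, if_neg (by decide : ¬(('t' : Char) = 'a')), if_neg (by decide : ¬(('t' : Char) = 'b')), if_neg (by decide : ¬(('t' : Char) = 'c')), if_neg (by decide : ¬(('t' : Char) = 'd')), if_neg (by decide : ¬(('t' : Char) = 'e')), if_neg (by decide : ¬(('t' : Char) = 'f')), if_neg (by decide : ¬(('t' : Char) = 'g')), if_neg (by decide : ¬(('t' : Char) = 'h')), if_neg (by decide : ¬(('t' : Char) = 'i')), if_neg (by decide : ¬(('t' : Char) = 'j')), if_neg (by decide : ¬(('t' : Char) = 'k')), if_neg (by decide :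 ¬(('t' : Char) = 'l')), if_neg (by decide : ¬(('t' : Char) = 'm')), if_neg (by decide : ¬(('t' : Char) = 'n')), if_neg (by decide : ¬(('t' : Char) = 'o')), if_neg (by decide : ¬(('t' : Char) = 'p')), if_neg (by decide : ¬(('t' : Char) = 'q')), if_neg (by decide : ¬(('t' : Char) = 'r')), if_neg (by decide : ¬(('t' : Char) = 's')), if_pos rfl, if_neg hsw]
        by_cases hb : i + 1 < w.length ∧ w.getD (i+1) default = 'h'
        · have hg2 : i + 2 ≤ w.length := by omega
          have ht1 : (w.drop (i+1)).take 1 = ['h'] := by rw [take_one_getD w (i+1) (by omega), hb.2]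
          rw [if_pos hg2, ht1, multi_t, if_neg (by decide : ¬((['h'] : List Char) = ['i','o','n'])), if_pos rfl, if_pos hb]
          exact ih _ _ _ (by omega) (by simp [hres])
        · have hp2 : (if i + 2 ≤ w.length then pvLookup multiCharMap ('t' :: (w.drop (i+1)).take 1) else none) = none := by
            split
            next hg =>
              have hne1 : ¬ ((w.drop (i+1)).take 1 = ['i','o','n']) := by intro he; have hl := congrArg List.length he; simp [List.length_take, List.length_drop] at hl; omega
              rw [take_one_getD w (i+1) (by omega)] at hne1 ⊢
              rw [multi_t, if_neg hne1, if_neg]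
              intro he; injection he with hh ht; exact hb ⟨by omega, hh⟩
            next => rfl
          rw [hp2, show pvLookup singleCharMap ['t'] = some ['ت'] from by decide, if_neg hb]
          exact ih _ _ _ (by omega) (by simp [hres])
    by_cases hc20 : w.getD i default = 'u'
    · rw [hc20]
      rw [probe_none _ _ (multi_none 'u' (by decide) _)]
      rw [probe_none _ _ (multi_none 'u' (by decide) _)]
      rw [probe_none _ _ (multi_none 'u' (by decide) _)]
      rw [show pvLookup singleCharMap ['u'] = some ['و'] from by decide]
      rw [if_neg (by decide : ¬(('u' : Char) = 'a')), if_neg (by decide : ¬(('u' : Char) = 'b')), if_neg (by decide : ¬(('u' : Char) = 'c')), if_neg (by decide : ¬(('u' : Char) = 'd')), if_neg (by decide : ¬(('u' : Char) = 'e')), if_neg (by decide : ¬(('u' : Char) = 'f')), if_neg (by decide : ¬(('u' : Char) = 'g')), if_neg (by decide : ¬(('u' : Char) = 'h')), if_neg (by decide : ¬(('u' : Char) = 'i')), if_neg (by decide : ¬(('u' : Char) = 'j')), if_neg (by decide : ¬(('u' : Char) = 'k')), if_neg (by decide : ¬(('u' : Char) = 'l')), if_neg (by decide : ¬(('u' :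 Char) = 'm')), if_neg (by decide : ¬(('u' : Char) = 'n')), if_neg (by decide : ¬(('u' : Char) = 'o')), if_neg (by decide : ¬(('u' : Char) = 'p')), if_neg (by decide : ¬(('u' : Char) = 'q')), if_neg (by decide : ¬(('u' : Char) = 'r')), if_neg (by decide : ¬(('u' : Char) = 's')), if_neg (by decide : ¬(('u' : Char) = 't')), if_pos rfl]
      exact ih _ _ _ (by omega) (by simp [hres])
    by_cases hc21 : w.getD i default = 'v'
    · rw [hc21]
      rw [probe_none _ _ (multi_none 'v' (by decide) _)]
      rw [probe_none _ _ (multi_none 'v' (by decide) _)]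
      rw [probe_none _ _ (multi_none 'v' (by decide) _)]
      rw [show pvLookup singleCharMap ['v'] = some ['ڤ'] from by decide]
      rw [if_neg (by decide : ¬(('v' : Char) = 'a')), if_neg (by decide : ¬(('v' : Char) = 'b')), if_neg (by decide : ¬(('v' : Char) = 'c')), if_neg (by decide : ¬(('v' : Char) = 'd')), if_neg (by decide : ¬(('v' : Char) = 'e')), if_neg (by decide : ¬(('v' : Char) = 'f')), if_neg (by decide : ¬(('v' : Char) = 'g')), if_neg (by decide : ¬(('v' : Char) = 'h')), if_neg (by decide : ¬(('v' : Char) = 'i')), if_neg (by decide : ¬(('v' : Char) = 'j')), if_neg (by decide : ¬(('v' : Char) = 'k')), if_neg (by decide : ¬(('v' : Char) = 'l')), if_neg (by decide : ¬(('v' : Char) = 'm')), if_neg (by decide : ¬(('v' : Char) = 'n')), if_neg (by decide : ¬(('v' : Char) = 'o')), if_neg (by decide : ¬(('v' : Char) = 'p')), if_neg (by decide : ¬(('v' : Char) = 'q')), if_neg (by decide : ¬(('v' : Char) = 'r')), if_neg (by decide : ¬(('v' : Char) = 's')), if_neg (by decide : ¬(('v' : Char) = 't')), if_neg (by decide : ¬(('v'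 : Char) = 'u')), if_pos rfl]
      exact ih _ _ _ (by omega) (by simp [hres])
    by_cases hc22 : w.getD i default = 'w'
    · rw [hc22]
      rw [probe_none _ _ (multi_none 'w' (by decide) _)]
      rw [probe_none _ _ (multi_none 'w' (by decide) _)]
      rw [probe_none _ _ (multi_none 'w' (by decide) _)]
      rw [show pvLookup singleCharMap ['w'] = some ['و'] from by decide]
      rw [if_neg (by decide : ¬(('w' : Char) = 'a')), if_neg (by decide : ¬(('w' : Char) = 'b')), if_neg (by decide : ¬(('w' : Char) = 'c')), if_neg (by decide : ¬(('w' : Char) = 'd')), if_neg (by decide : ¬(('w' : Char) = 'e')), if_neg (by decide : ¬(('w' : Char) = 'f')), if_neg (by decide : ¬(('w' : Char) = 'g')), if_neg (by decide : ¬(('w' : Char) = 'h')), if_neg (by decide : ¬(('w' : Char) = 'i')), if_neg (by decide : ¬(('w' : Char) = 'j')), if_neg (by decide : ¬(('w' : Char) = 'k')), if_neg (by decide : ¬(('w' : Char) = 'l')), if_neg (by decide : ¬(('w' : Char) = 'm')), if_neg (by decide : ¬(('w' : Char) = 'n')), if_neg (by decide : ¬(('w' : Char) = 'o')), if_neg (by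 decide : ¬(('w' : Char) = 'p')), if_neg (by decide : ¬(('w' : Char) = 'q')), if_neg (by decide : ¬(('w' : Char) = 'r')), if_neg (by decide : ¬(('w' : Char) = 's')), if_neg (by decide : ¬(('w' : Char) = 't')), if_neg (by decide : ¬(('w' : Char) = 'u')), if_neg (by decide : ¬(('w' : Char) = 'v')), if_pos rfl]
      exact ih _ _ _ (by omega) (by simp [hres])
    by_cases hc23 : w.getD i default = 'x'
    · rw [hc23]
      rw [probe_none _ _ (multi_none 'x' (by decide) _)]
      rw [probe_none _ _ (multi_none 'x' (by decide) _)]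
      rw [probe_none _ _ (multi_none 'x' (by decide) _)]
      rw [show pvLookup singleCharMap ['x'] = some ['ک','س'] from by decide]
      rw [if_neg (by decide : ¬(('x' : Char) = 'a')), if_neg (by decide : ¬(('x' : Char) = 'b')), if_neg (by decide : ¬(('x' : Char) = 'c')), if_neg (by decide : ¬(('x' : Char) = 'd')), if_neg (by decide : ¬(('x' : Char) = 'e')), if_neg (by decide : ¬(('x' : Char) = 'f')), if_neg (by decide : ¬(('x' : Char) = 'g')), if_neg (by decide : ¬(('x' : Char) = 'h')), if_neg (by decide : ¬(('x' : Char) = 'i')), if_neg (by decide : ¬(('x' : Char) = 'j')), if_neg (by decide : ¬(('x' : Char) = 'k')), if_neg (by decide : ¬(('x' : Char) = 'l')), if_neg (by decide : ¬(('x' : Char) = 'm')), if_neg (by decide : ¬(('x' : Char) = 'n')), if_neg (by decide : ¬(('x' : Char) = 'o')), if_neg (by decide : ¬(('x' : Char) = 'p')), if_neg (by decide : ¬(('x' : Char) = 'q')), if_neg (by decide : ¬(('x' : Char) = 'r')), if_neg (by decide : ¬(('x' : Char) = 's')), if_neg (by decide : ¬(('x' : Char) = 't')), if_neg (by decide : ¬(('x'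 : Char) = 'u')), if_neg (by decide : ¬(('x' : Char) = 'v')), if_neg (by decide : ¬(('x' : Char) = 'w')), if_pos rfl]
      exact ih _ _ _ (by omega) (by simp [hres])
    by_cases hc24 : w.getD i default = 'y'
    · rw [hc24]
      rw [probe_none _ _ (multi_none 'y' (by decide) _)]
      rw [probe_none _ _ (multi_none 'y' (by decide) _)]
      rw [probe_none _ _ (multi_none 'y' (by decide) _)]
      rw [show pvLookup singleCharMap ['y'] = some ['ی'] from by decide]
      rw [if_neg (by decide : ¬(('y' : Char) = 'a')), if_neg (by decide : ¬(('y' : Char) = 'b')), if_neg (by decide : ¬(('y' : Char) = 'c')), if_neg (by decide : ¬(('y' : Char) = 'd')), if_neg (by decide : ¬(('y' : Char) = 'e')), if_neg (by decide : ¬(('y' : Char) = 'f')), if_neg (by decide : ¬(('y' : Char) = 'g')), if_neg (by decide : ¬(('y' : Char) = 'h')), if_neg (by decide : ¬(('y' : Char) = 'i')), if_neg (by decide : ¬(('y' : Char) = 'j')), if_neg (by decide : ¬(('y' : Char) = 'k')), if_neg (by decide : ¬(('y' : Char) = 'l')), if_neg (by decide : ¬(('y' : Char) = 'm')), if_neg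 (by decide : ¬(('y' : Char) = 'n')), if_neg (by decide : ¬(('y' : Char) = 'o')), if_neg (by decide : ¬(('y' : Char) = 'p')), if_neg (by decide : ¬(('y' : Char) = 'q')), if_neg (by decide : ¬(('y' : Char) = 'r')), if_neg (by decide : ¬(('y' : Char) = 's')), if_neg (by decide : ¬(('y' : Char) = 't')), if_neg (by decide : ¬(('y' : Char) = 'u')), if_neg (by decide : ¬(('y' : Char) = 'v')), if_neg (by decide : ¬(('y' : Char) = 'w')), if_neg (by decide : ¬(('y' : Char) = 'x')), if_pos rfl]
      exact ih _ _ _ (by omega) (by simp [hres])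
    by_cases hc25 : w.getD i default = 'z'
    · rw [hc25]
      have hp4 : (if i + 4 ≤ w.length then pvLookup multiCharMap ('z' :: (w.drop (i+1)).take 3) else none) = none := by
        split
        next hg =>
          have hne1 : ¬ ((w.drop (i+1)).take 3 = ['h']) := by intro he; have hl := congrArg List.length he; simp [List.length_take, List.length_drop] at hl; omega
          rw [multi_z, if_neg hne1]
        next => rfl
      have hp3 : (if i + 3 ≤ w.length then pvLookup multiCharMap ('z' :: (w.drop (i+1)).take 2) else none) = none := by
        split
        next hg =>
          have hne1 : ¬ ((w.drop (i+1)).take 2 = ['h']) := by intro he; have hl := congrArg List.length he; simp [List.length_take, List.length_drop] at hl; omega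
          rw [multi_z, if_neg hne1]
        next => rfl
      rw [hp4, hp3, if_neg (by decide : ¬(('z' : Char) = 'a')), if_neg (by decide : ¬(('z' : Char) = 'b')), if_neg (by decide : ¬(('z' : Char) = 'c')), if_neg (by decide : ¬(('z' : Char) = 'd')), if_neg (by decide : ¬(('z' : Char) = 'e')), if_neg (by decide : ¬(('z' : Char) = 'f')), if_neg (by decide : ¬(('z' : Char) = 'g')), if_neg (by decide : ¬(('z' : Char) = 'h')), if_neg (by decide : ¬(('z' : Char) = 'i')), if_neg (by decide : ¬(('z' : Char) = 'j')), if_neg (by decide : ¬(('z' : Char) = 'k')), if_neg (by decide : ¬(('z' : Char) = 'l')), if_neg (by decide : ¬(('z' : Char) = 'm')), if_neg (by decide : ¬(('z' : Char) = 'n')), if_neg (by decide : ¬(('z' : Char) = 'o')), if_neg (by decide : ¬(('z' : Char) = 'p')), if_neg (by decide : ¬(('z' : Char) = 'q')), if_neg (by decide : ¬(('z' : Char) = 'r')), if_neg (by decide : ¬(('z' : Char) = 's')), if_neg (by decide : ¬(('z' : Char) = 't')), if_neg (by decide : ¬(('z' : Char) = 'u')), if_neg (by decide : ¬(('z' : Char)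 = 'v')), if_neg (by decide : ¬(('z' : Char) = 'w')), if_neg (by decide : ¬(('z' : Char) = 'x')), if_neg (by decide : ¬(('z' : Char) = 'y')), if_pos rfl]
      by_cases hb : i + 1 < w.length ∧ w.getD (i+1) default = 'h'
      · have hg2 : i + 2 ≤ w.length := by omega
        have ht1 : (w.drop (i+1)).take 1 = ['h'] := by rw [take_one_getD w (i+1) (by omega), hb.2]
        rw [if_pos hg2, ht1, multi_z, if_pos rfl, if_pos hb]
        exact ih _ _ _ (by omega) (by simp [hres])
      · have hp2 : (if i + 2 ≤ w.length then pvLookup multiCharMap ('z' :: (w.drop (i+1)).take 1) else none) = none := by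
          split
          next hg =>
            rw [take_one_getD w (i+1) (by omega), multi_z, if_neg]
            intro he; injection he with hh ht; exact hb ⟨by omega, hh⟩
          next => rfl
        rw [hp2, show pvLookup singleCharMap ['z'] = some ['ز'] from by decide, if_neg hb]
        exact ih _ _ _ (by omega) (by simp [hres])
    -- default: character is not an ASCII lowercase letter
    have hm : ∀ t, pvLookup multiCharMap (w.getD i default :: t) = none := by
      intro t; apply pvLookup_eq_none; intro kv hkv
      fin_cases hkv <;> (intro he; injection he with hh ht)
      exacts [hc19 hh.symm, hc6 hh.symm, hc15 hh.symm, hc18 hh.symm, hc2 hh.symm, hc10 hh.symm, hc6 hh.symm, hc19 hh.symm, hc25 hh.symm, hc14 hh.symm, hc4 hh.symm, hc16 hh.symm, hc2 hh.symm]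
    rw [probe_none _ _ (hm _), probe_none _ _ (hm _), probe_none _ _ (hm _)]
    have hs : pvLookup singleCharMap [w.getD i default] = none := by
      apply pvLookup_eq_none; intro kv hkv
      fin_cases hkv <;> (intro he; injection he with hh ht)
      exacts [hc0 hh.symm, hc1 hh.symm, hc2 hh.symm, hc3 hh.symm, hc4 hh.symm, hc5 hh.symm, hc6 hh.symm, hc7 hh.symm, hc8 hh.symm, hc9 hh.symm, hc10 hh.symm, hc11 hh.symm, hc12 hh.symm, hc13 hh.symm, hc14 hh.symm, hc15 hh.symm, hc16 hh.symm, hc17 hh.symm, hc18 hh.symm, hc19 hh.symm, hc20 hh.symm, hc21 hh.symm, hc22 hh.symm, hc23 hh.symm, hc24 hh.symm, hc25 hh.symm]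
    rw [hs, if_neg hc0, if_neg hc1, if_neg hc2, if_neg hc3, if_neg hc4, if_neg hc5, if_neg hc6, if_neg hc7, if_neg hc8, if_neg hc9, if_neg hc10, if_neg hc11, if_neg hc12, if_neg hc13, if_neg hc14, if_neg hc15, if_neg hc16, if_neg hc17, if_neg hc18, if_neg hc19, if_neg hc20, if_neg hc21, if_neg hc22, if_neg hc23, if_neg hc24, if_neg hc25]
    exact ih _ _ _ (by omega) (by simp [hres])

-- ===== VERDICT (by name: the statement is the Claim_ definition above) =====
theorem fallback_transliterate_py_spec : Claim_equal_fallback_transliterate_py := by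
  intro word _
  unfold Spec_fallback_transliterate_py fallback_transliterate_py fallback_transliterate_py_alt
  simp only []
  rw [join_nil_flatten]
  congr 1
  apply loop_eq _ ((PySem.Str.lower word).toList.length) 0 _ _ (by omega)
  rcases (PySem.Str.lower word).toList with _ | ⟨c, t⟩
  · rfl
  · by_cases hv : c ∈ ['a','e','i','o','u'] <;> simp [hv]
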